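-- pv_equiv track=rewrite | github.com/super-dainiu/gomoku | code/commit 1/AI_v1_2.py | nearby
-- ===== SOURCE A (Python) =====
-- MAX_BOARD = 20
--
-- def nearby(x, y, board, k1):
--     Directionset = [(0, 1), (1, 0), (1, 1), (1, -1)]
--     sum1 = 0
--
--     for direction in Directionset:
--         k = 0
--         x_now1 = x_now2 = x
--         y_now1 = y_now2 = y
--         while (x_now1 >= 0 and y_now1 >= 0 and k <= 1 and x_now1 <= MAX_BOARD - 1 and y_now1 <= MAX_BOARD - 1):
--             if x_now1 - direction[0] >= 0 and y_now1 - direction[1] >= 0 and y_now1 - direction[1] <= MAX_BOARD - 1: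
--                 x_now1 = x_now1 - direction[0]
--                 y_now1 = y_now1 - direction[1]
--                 k += 1
--             else:
--                 break
--         k = 0
--         while (x_now2 <= MAX_BOARD - 1 and y_now2 <= MAX_BOARD - 1 and k <= 1 and x_now2 >= 0 and y_now2 >= 0):
--             if x_now2 + direction[0] <= MAX_BOARD - 1 and y_now2 + direction[1] >= 0 and y_now2 + direction[1] <= MAX_BOARD - 1:
--                 x_now2 = x_now2 + direction[0]
--                 y_now2 = y_now2 + direction[1]
--                 k += 1
--             else:
--                 break
--         for k in range(max(x_now2 - x_now1 + 1,abs(y_now2 - y_now1) + 1)):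
--             if x_now1 + k * direction[0] == x and y_now1 + k * direction[1] == y:
--                 continue
--             else:
--                 if board[x_now1 + k * direction[0]][y_now1 + k * direction[1]] != 0:
--                     sum1 += 1
--     return sum1 >= k1
-- ===== SOURCE B (Python) =====
-- MAX_BOARD = 20
--
-- def nearby(x, y, board, k1):
--     count = 0
--     if 0 <= x < MAX_BOARD and 0 <= y < MAX_BOARD:
--         for dx, dy in ((0, 1), (1, 0), (1, 1), (1, -1)):
--             for t in (-2, -1, 1, 2):
--                 i, j = x + t * dx, y + t * dy
--                 if 0 <= i < MAX_BOARD and 0 <= j < MAX_BOARD and board[i][j] != 0: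
--                     count += 1
--     return count >= k1
-- ===== Notes on version B (the rewrite author's own statement) =====
-- stated objective: simpler
-- what changed: B replaces A's two bounded while-walks per direction plus span reconstruction over range() with a single guarded scan of the fixed offsets (-2,-1,1,2) around the center, counting nonzero cells directly; Pre_ excludes only inputs where both programs raise IndexError (a required neighborhood cell outside the given board).
import Mathlib
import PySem

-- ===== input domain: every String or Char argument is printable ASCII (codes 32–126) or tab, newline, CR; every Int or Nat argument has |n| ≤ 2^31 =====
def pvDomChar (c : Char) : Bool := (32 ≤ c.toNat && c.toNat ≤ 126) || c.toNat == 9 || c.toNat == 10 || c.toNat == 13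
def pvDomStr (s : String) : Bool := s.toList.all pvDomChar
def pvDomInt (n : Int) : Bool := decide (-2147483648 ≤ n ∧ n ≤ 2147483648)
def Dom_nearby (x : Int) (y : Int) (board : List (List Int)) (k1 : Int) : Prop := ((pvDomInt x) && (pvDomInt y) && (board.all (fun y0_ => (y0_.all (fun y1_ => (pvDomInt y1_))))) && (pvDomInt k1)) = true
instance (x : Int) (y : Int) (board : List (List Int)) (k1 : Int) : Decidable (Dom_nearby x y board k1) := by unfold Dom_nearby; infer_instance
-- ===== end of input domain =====

-- B replaces A's walk-back/walk-forward-then-rescan-the-span scheme with a direct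
-- bounds-guarded scan of the fixed offsets (-2,-1,1,2) per direction (objective: simpler).

-- ===== PORT A =====
-- board[i][j]; under Pre_ every performed read is in range, so the default 0 is never used
def pyCell (board : List (List Int)) (i j : Int) : Int :=
  ((PySem.List.pyGet? board i).bind (fun r => PySem.List.pyGet? r j)).getD 0

def nearbyDirs : List (Int × Int) := [(0,1), (1,0), (1,1), (1,-1)]

-- A's first while loop; each guard check consumes one fuel, the loop checks its guard
-- at most 3 times (k is 0,1,2), so fuel 4 makes this an exact transliteration
def walkB (fuel : Nat) (dx dy x1 y1 k : Int) : Int × Int :=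
  match fuel with
  | 0 => (x1, y1)
  | fuel+1 =>
    if x1 ≥ 0 ∧ y1 ≥ 0 ∧ k ≤ 1 ∧ x1 ≤ 19 ∧ y1 ≤ 19 then
      if x1 - dx ≥ 0 ∧ y1 - dy ≥ 0 ∧ y1 - dy ≤ 19 then
        walkB fuel dx dy (x1 - dx) (y1 - dy) (k + 1)
      else (x1, y1)
    else (x1, y1)

-- A's second while loop, same fuel argument
def walkF (fuel : Nat) (dx dy x2 y2 k : Int) : Int × Int :=
  match fuel with
  | 0 => (x2, y2)
  | fuel+1 =>
    if x2 ≤ 19 ∧ y2 ≤ 19 ∧ k ≤ 1 ∧ x2 ≥ 0 ∧ y2 ≥ 0 then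
      if x2 + dx ≤ 19 ∧ y2 + dy ≥ 0 ∧ y2 + dy ≤ 19 then
        walkF fuel dx dy (x2 + dx) (y2 + dy) (k + 1)
      else (x2, y2)
    else (x2, y2)

-- body of A's outer 'for direction in Directionset' loop
def nearbyDirBody (x y : Int) (board : List (List Int)) (sum1 : Int) (d : Int × Int) : Int :=
  let p1 := walkB 4 d.1 d.2 x y 0
  let p2 := walkF 4 d.1 d.2 x y 0
  (PySem.List.pyRange 0 (max (p2.1 - p1.1 + 1) (|p2.2 - p1.2| + 1)) 1).foldl
    (fun s k =>
      if p1.1 + k * d.1 = x ∧ p1.2 + k * d.2 = y then s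
      else if pyCell board (p1.1 + k * d.1) (p1.2 + k * d.2) ≠ 0 then s + 1 else s)
    sum1

def nearby (x : Int) (y : Int) (board : List (List Int)) (k1 : Int) : Bool :=
  decide (nearbyDirs.foldl (nearbyDirBody x y board) 0 ≥ k1)

-- ===== PORT B =====
def nearbyOffsets : List Int := [-2, -1, 1, 2]

def nearby_alt (x : Int) (y : Int) (board : List (List Int)) (k1 : Int) : Bool :=
  let count : Int :=
    if 0 ≤ x ∧ x < 20 ∧ 0 ≤ y ∧ y < 20 then
      nearbyDirs.foldl (fun acc d =>
        nearbyOffsets.foldl (fun acc t =>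
          let i := x + t * d.1
          let j := y + t * d.2
          if 0 ≤ i ∧ i < 20 ∧ 0 ≤ j ∧ j < 20 then
            if pyCell board i j ≠ 0 then acc + 1 else acc
          else acc) acc) 0
    else 0
  decide (count ≥ k1)

-- ===== PRECONDITION & SPEC =====
-- Pre_ excludes exactly the inputs where A (and B) raise IndexError: an in-bounds
-- (within 0..19) neighborhood cell of an in-bounds center that lies outside the board.
def Pre_nearby (x : Int) (y : Int) (board : List (List Int)) (k1 : Int) : Prop :=
  (0 ≤ x ∧ x < 20 ∧ 0 ≤ y ∧ y < 20) →
    ∀ d ∈ ([(0,1), (1,0), (1,1), (1,-1)] : List (Int × Int)),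
      ∀ t ∈ ([-2, -1, 1, 2] : List Int),
        (0 ≤ x + t * d.1 ∧ x + t * d.1 < 20 ∧ 0 ≤ y + t * d.2 ∧ y + t * d.2 < 20) →
          (x + t * d.1).toNat < board.length ∧
          (y + t * d.2).toNat < (board.getD (x + t * d.1).toNat []).length

instance (x : Int) (y : Int) (board : List (List Int)) (k1 : Int) : Decidable (Pre_nearby x y board k1) := by unfold Pre_nearby; infer_instance

def pvWitness_nearby : Int × Int × List (List Int) × Int :=
  (0, 0, [[0,0,0],[0,0,0],[0,1,0]], 1)

def Spec_nearby (x : Int) (y : Int) (board : List (List Int)) (k1 : Int) (out : Bool) : Prop := out = nearby_alt x y board k1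
instance (x : Int) (y : Int) (board : List (List Int)) (k1 : Int) (out : Bool) : Decidable (Spec_nearby x y board k1 out) := by unfold Spec_nearby; infer_instance

-- ===== CLAIM (what is proved, stated in full; the proofs are below) =====
def Claim_equal_nearby : Prop := ∀ (x : Int) (y : Int) (board : List (List Int)) (k1 : Int), Dom_nearby x y board k1 → Pre_nearby x y board k1 → Spec_nearby x y board k1 (nearby x y board k1)

-- ===== LEMMAS AND PROOFS =====

-- the list of cells A's inner for-range loop actually reads (the center is skipped)
def Acells (x y : Int) (d : Int × Int) : List (Int × Int) :=
  let p1 := walkB 4 d.1 d.2 x y 0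
  let p2 := walkF 4 d.1 d.2 x y 0
  (PySem.List.pyRange 0 (max (p2.1 - p1.1 + 1) (|p2.2 - p1.2| + 1)) 1).filterMap
    (fun k =>
      if p1.1 + k * d.1 = x ∧ p1.2 + k * d.2 = y then none
      else some (p1.1 + k * d.1, p1.2 + k * d.2))

-- the list of cells B's inner offset loop reads
def Bcells (x y : Int) (d : Int × Int) : List (Int × Int) :=
  nearbyOffsets.filterMap (fun t =>
    if 0 ≤ x + t * d.1 ∧ x + t * d.1 < 20 ∧ 0 ≤ y + t * d.2 ∧ y + t * d.2 < 20 then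
      some (x + t * d.1, y + t * d.2)
    else none)

theorem foldl_skip_filterMap {α β γ : Type} (l : List α) (c : α → Prop) [DecidablePred c]
    (g : α → β) (step : γ → β → γ) (s : γ) :
    l.foldl (fun s k => if c k then s else step s (g k)) s
      = (l.filterMap (fun k => if c k then none else some (g k))).foldl step s := by
  induction l generalizing s with
  | nil => rfl
  | cons a l ih => by_cases h : c a <;> simp [h, ih]

theorem foldl_guard_filterMap {α β γ : Type} (l : List α) (c : α → Prop) [DecidablePred c]
    (g : α → β) (step : γ → β → γ) (s : γ) :
    l.foldl (fun s k => if c k then step s (g k) else s) s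
      = (l.filterMap (fun k => if c k then some (g k) else none)).foldl step s := by
  induction l generalizing s with
  | nil => rfl
  | cons a l ih => by_cases h : c a <;> simp [h, ih]

theorem nearbyDirBody_eq_Acells (x y : Int) (board : List (List Int)) (s : Int) (d : Int × Int) :
    nearbyDirBody x y board s d
      = (Acells x y d).foldl (fun s c => if pyCell board c.1 c.2 ≠ 0 then s + 1 else s) s := by
  unfold nearbyDirBody Acells
  exact foldl_skip_filterMap (PySem.List.pyRange 0 (max ((walkF 4 d.1 d.2 x y 0).1 - (walkB 4 d.1 d.2 x y 0).1 + 1) (|(walkF 4 d.1 d.2 x y 0).2 - (walkB 4 d.1 d.2 x y 0).2| + 1)) 1)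
    (fun k => (walkB 4 d.1 d.2 x y 0).1 + k * d.1 = x ∧ (walkB 4 d.1 d.2 x y 0).2 + k * d.2 = y)
    (fun k => ((walkB 4 d.1 d.2 x y 0).1 + k * d.1, (walkB 4 d.1 d.2 x y 0).2 + k * d.2))
    (fun s c => if pyCell board c.1 c.2 ≠ 0 then s + 1 else s) s

theorem altBody_eq_Bcells (x y : Int) (board : List (List Int)) (s : Int) (d : Int × Int) :
    nearbyOffsets.foldl (fun acc t =>
        let i := x + t * d.1
        let j := y + t * d.2
        if 0 ≤ i ∧ i < 20 ∧ 0 ≤ j ∧ j < 20 then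
          if pyCell board i j ≠ 0 then acc + 1 else acc
        else acc) s
      = (Bcells x y d).foldl (fun s c => if pyCell board c.1 c.2 ≠ 0 then s + 1 else s) s := by
  unfold Bcells
  exact foldl_guard_filterMap nearbyOffsets
    (fun t => 0 ≤ x + t * d.1 ∧ x + t * d.1 < 20 ∧ 0 ≤ y + t * d.2 ∧ y + t * d.2 < 20)
    (fun t => (x + t * d.1, y + t * d.2))
    (fun s c => if pyCell board c.1 c.2 ≠ 0 then s + 1 else s) s

-- for an in-bounds center the two cell lists coincide (finite check over all 400 centers)
theorem cells_agree : ∀ xn : Nat, xn < 20 → ∀ yn : Nat, yn < 20 →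
    ∀ d ∈ nearbyDirs, Acells (xn : Int) (yn : Int) d = Bcells (xn : Int) (yn : Int) d := by
  decide

-- out-of-bounds center: A's direction body leaves the accumulator unchanged
theorem nearbyDirBody_oob (x y : Int) (board : List (List Int)) (s : Int) (d : Int × Int)
    (h : ¬ (0 ≤ x ∧ x < 20 ∧ 0 ≤ y ∧ y < 20)) : nearbyDirBody x y board s d = s := by
  unfold nearbyDirBody
  rw [show walkB 4 d.1 d.2 x y 0 = (x, y) by unfold walkB; rw [if_neg (by omega)]]
  rw [show walkF 4 d.1 d.2 x y 0 = (x, y) by unfold walkF; rw [if_neg (by omega)]]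
  simp only [sub_self, abs_zero, zero_add, max_self]
  rw [show PySem.List.pyRange 0 1 1 = ([0] : List Int) from by decide]
  simp

-- ===== VERDICT (by name: the statement is the Claim_ definition above) =====
theorem nearby_spec : Claim_equal_nearby := by
  intro x y board k1 _ _
  unfold Spec_nearby nearby nearby_alt
  have h : nearbyDirs.foldl (nearbyDirBody x y board) 0
      = (if 0 ≤ x ∧ x < 20 ∧ 0 ≤ y ∧ y < 20 then
          nearbyDirs.foldl (fun acc d =>
            nearbyOffsets.foldl (fun acc t =>
              let i := x + t * d.1
              let j := y + t * d.2
              if 0 ≤ i ∧ i < 20 ∧ 0 ≤ j ∧ j < 20 then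
                if pyCell board i j ≠ 0 then acc + 1 else acc
              else acc) acc) 0
        else 0) := by
    by_cases hc : 0 ≤ x ∧ x < 20 ∧ 0 ≤ y ∧ y < 20
    · rw [if_pos hc]
      refine List.foldl_ext _ _ 0 ?_
      intro s d hd
      show nearbyDirBody x y board s d
        = nearbyOffsets.foldl (fun acc t =>
            let i := x + t * d.1
            let j := y + t * d.2
            if 0 ≤ i ∧ i < 20 ∧ 0 ≤ j ∧ j < 20 then
              if pyCell board i j ≠ 0 then acc + 1 else acc
            else acc) s
      rw [nearbyDirBody_eq_Acells, altBody_eq_Bcells]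
      have hx : x = ((x.toNat : Nat) : Int) := by omega
      have hy : y = ((y.toNat : Nat) : Int) := by omega
      rw [hx, hy, cells_agree x.toNat (by omega) y.toNat (by omega) d hd]
    · rw [if_neg hc]
      have step : ∀ s : Int, ∀ d ∈ nearbyDirs, nearbyDirBody x y board s d = s := by
        intro s d _; exact nearbyDirBody_oob x y board s d hc
      calc nearbyDirs.foldl (nearbyDirBody x y board) 0
          = nearbyDirs.foldl (fun s _ => s) 0 :=
            List.foldl_ext _ _ 0 (by intro s d hd; exact step s d hd)
        _ = 0 := by simp
  rw [h]
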